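-- pv_equiv track=rewrite | github.com/RuanVitorr/atividades-de-Computabilidade-e-Complexidade-de-Algortimos | att11.py | afd_numero_impar_de_as
-- ===== SOURCE A (Python) =====
-- def afd_numero_impar_de_as(palavra):
--     estado = 'q0'
--
--     for char in palavra:
--         if estado == 'q0':
--             if char == 'a':
--                 estado = 'q1'
--             elif char == 'b':
--                 estado = 'q0'
--             else:
--                 return 'palavra invalida (caractere inválido)'
--         elif estado == 'q1':
--             if char == 'a':
--                 estado = 'q0'
--             elif char == 'b':
--                 estado = 'q1'
--             else:
--                 return 'palavra invalida (caractere inválido)'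
--
--     if estado == 'q1':
--         return "palavra valida (número ímpar de 'a's)"
--     else:
--         return "palavra invalida (número par de 'a's)"
-- ===== SOURCE B (Python) =====
-- def afd_numero_impar_de_as(palavra):
--     if any(c not in 'ab' for c in palavra):
--         return 'palavra invalida (caractere inválido)'
--     na = sum(1 for c in palavra if c == 'a')
--     if na % 2 == 1:
--         return "palavra valida (número ímpar de 'a's)"
--     return "palavra invalida (número par de 'a's)"
-- ===== Notes on version B (the rewrite author's own statement) =====
-- stated objective: idiomatic
-- what changed: Replaces the explicit two-state DFA simulation with a validation pass (any char outside 'ab') followed by a parity check of the number of 'a's.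
import Mathlib
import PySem

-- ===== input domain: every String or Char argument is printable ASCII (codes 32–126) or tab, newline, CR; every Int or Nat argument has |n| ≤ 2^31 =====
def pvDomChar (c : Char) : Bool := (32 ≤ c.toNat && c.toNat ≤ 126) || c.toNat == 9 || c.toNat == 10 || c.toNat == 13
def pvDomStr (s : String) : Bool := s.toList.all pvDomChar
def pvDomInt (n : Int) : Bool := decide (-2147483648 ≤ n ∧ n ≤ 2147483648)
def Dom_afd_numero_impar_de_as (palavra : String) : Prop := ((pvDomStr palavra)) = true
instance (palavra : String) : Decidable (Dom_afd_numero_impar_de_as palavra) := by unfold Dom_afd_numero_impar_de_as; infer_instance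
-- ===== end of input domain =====

-- B replaces A's explicit two-state DFA with a validation pass plus a parity check of the
-- count of 'a's (idiomatic decomposition); return values are identical on all inputs.

-- ===== PORT A =====
-- A's for-loop with early return, as structural recursion over (chars, estado).
def afdLoopA : List Char → String → String
  | [], estado =>
      if estado = "q1" then "palavra valida (número ímpar de 'a's)"
      else "palavra invalida (número par de 'a's)"
  | c :: rest, estado =>
      if estado = "q0" then
        if c = 'a' then afdLoopA rest "q1"
        else if c = 'b' then afdLoopA rest "q0"
        else "palavra invalida (caractere inválido)"
      else if estado = "q1" then
        if c = 'a' then afdLoopA rest "q0"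
        else if c = 'b' then afdLoopA rest "q1"
        else "palavra invalida (caractere inválido)"
      else afdLoopA rest estado

def afd_numero_impar_de_as (palavra : String) : String :=
  afdLoopA palavra.toList "q0"

-- ===== PORT B =====
def afd_numero_impar_de_as_alt (palavra : String) : String :=
  let cs := palavra.toList
  if cs.any (fun c => !(c == 'a' || c == 'b')) then
    "palavra invalida (caractere inválido)"
  else if cs.count 'a' % 2 == 1 then
    "palavra valida (número ímpar de 'a's)"
  else
    "palavra invalida (número par de 'a's)"

-- ===== PRECONDITION & SPEC =====
def Spec_afd_numero_impar_de_as (palavra : String) (out : String) : Prop := out = afd_numero_impar_de_as_alt palavra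
instance (palavra : String) (out : String) : Decidable (Spec_afd_numero_impar_de_as palavra out) := by unfold Spec_afd_numero_impar_de_as; infer_instance

-- ===== CLAIM (what is proved, stated in full; the proofs are below) =====
def Claim_equal_afd_numero_impar_de_as : Prop := ∀ (palavra : String), Dom_afd_numero_impar_de_as palavra → Spec_afd_numero_impar_de_as palavra (afd_numero_impar_de_as palavra)

-- ===== LEMMAS AND PROOFS =====
-- Loop invariant: starting from state q0/q1 (parity flag b), A's loop returns the
-- invalid-char message iff some char is outside {a,b}, else the parity message.
theorem afdLoopA_eq (cs : List Char) (b : Bool) :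
    afdLoopA cs (if b then "q1" else "q0") =
      (if cs.any (fun c => !(c == 'a' || c == 'b')) then
        "palavra invalida (caractere inválido)"
      else if (cs.count 'a' + (if b then 1 else 0)) % 2 == 1 then
        "palavra valida (número ímpar de 'a's)"
      else
        "palavra invalida (número par de 'a's)") := by
  induction cs generalizing b with
  | nil => cases b <;> simp [afdLoopA]
  | cons c rest ih =>
    by_cases ha : c = 'a'
    · subst ha
      cases b
      · have := ih true
        simp [afdLoopA] at this ⊢
        rw [this]
      · have := ih false
        simp [afdLoopA] at this ⊢
        rw [this]
        have h2 : (List.count 'a' rest + 1 + 1) % 2 = List.count 'a' rest % 2 := by omega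
        rw [h2]
    · by_cases hb : c = 'b'
      · subst hb
        cases b
        · have := ih false
          simp [afdLoopA] at this ⊢
          rw [this]
        · have := ih true
          simp [afdLoopA] at this ⊢
          rw [this]
      · cases b <;> simp [afdLoopA, ha, hb]

-- ===== VERDICT (by name: the statement is the Claim_ definition above) =====
theorem afd_numero_impar_de_as_spec : Claim_equal_afd_numero_impar_de_as := by
  intro palavra _
  unfold Spec_afd_numero_impar_de_as afd_numero_impar_de_as afd_numero_impar_de_as_alt
  have h := afdLoopA_eq palavra.toList false
  simp at h
  rw [h]
  simp
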